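-- pv_equiv track=rewrite | github.com/abcworld123/practice | baekjoon/Gold/[G1] Balanced Lineup.py | get
-- ===== SOURCE A (Python) =====
-- def get(segtree, start, end, left, right, i):
--     if left <= start and end <= right: return segtree[i]
--     else:
--         mid, child = (start + end) >> 1, i << 1
--         arr = ()
--         if left <= mid: arr += get(segtree, start, mid, left, right, child)
--         if mid + 1 <= right: arr += get(segtree, mid + 1, end, left, right, child + 1)
--         return min(arr), max(arr)
-- ===== SOURCE B (Python) =====
-- def get(segtree, start, end, left, right, i):
--     if left <= start and end <= right:
--         return segtree[i]
--     stack = [(start, end, i)]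
--     vals = []
--     while stack:
--         s, e, j = stack.pop()
--         if left <= s and e <= right:
--             vals.extend(segtree[j])
--         else:
--             mid = (s + e) >> 1
--             child = j << 1
--             if mid + 1 <= right:
--                 stack.append((mid + 1, e, child + 1))
--             if left <= mid:
--                 stack.append((s, mid, child))
--     return min(vals), max(vals)
-- ===== Notes on version B (the rewrite author's own statement) =====
-- stated objective: alternative
-- what changed: Replaces A's tuple-concatenating recursion by an explicit LIFO stack that collects the covered nodes' values into one flat list and takes a single min/max at the end (with a direct return when the root node is already fully covered).
-- outside the precondition, e.g. on get([(1, 1), (2, 2), (3, 3)], 0, 1, 0, 0, 1): A returns (3, 3), B returns (3, 3); on get([(0, 0), (1, 1), (2, 2), (3, 3)], 0, 1, 0, 0, -2): A returns (0, 0), B returns (0, 0)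
import Mathlib
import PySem

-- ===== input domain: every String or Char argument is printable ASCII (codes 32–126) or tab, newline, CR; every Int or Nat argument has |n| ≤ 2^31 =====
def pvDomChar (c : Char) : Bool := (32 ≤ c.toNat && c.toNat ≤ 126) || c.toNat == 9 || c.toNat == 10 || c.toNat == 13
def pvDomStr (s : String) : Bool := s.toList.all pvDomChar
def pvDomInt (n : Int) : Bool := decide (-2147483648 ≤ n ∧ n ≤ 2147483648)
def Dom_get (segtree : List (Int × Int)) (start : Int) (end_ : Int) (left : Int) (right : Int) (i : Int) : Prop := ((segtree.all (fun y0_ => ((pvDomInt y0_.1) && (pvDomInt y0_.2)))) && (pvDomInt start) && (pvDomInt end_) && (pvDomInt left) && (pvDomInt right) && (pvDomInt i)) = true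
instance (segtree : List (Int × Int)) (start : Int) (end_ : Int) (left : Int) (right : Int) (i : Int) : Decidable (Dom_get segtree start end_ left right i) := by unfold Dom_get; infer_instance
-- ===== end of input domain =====

-- B replaces A's recursion by an explicit stack collecting covered-node values, one min/max at the end; objective: alternative decomposition, same cost.


-- ===== PORT A =====
-- Literal port of A.  `segtree[i]` is PySem.List.pyGet? (IndexError → default (0,0), excluded by Pre_);
-- `(s+e) >> 1` is floor division by 2 and `i << 1` is `i * 2` (both exact on Int);
-- `min(arr)/max(arr)` on the empty tuple is a ValueError (default 0, excluded by Pre_).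
-- The recursion carries a fuel argument as a totality guard only: the supplied fuel
-- ((end_-start).toNat + 1) exceeds the recursion depth on every input on which Python
-- returns, since the interval strictly shrinks at each level; where Python instead
-- recurses unboundedly (RecursionError, outside Pre_) exhausted fuel returns (0, 0).
def getF (segtree : List (Int × Int)) (left right : Int) : Nat → Int → Int → Int → Int × Int
  | 0, _, _, _ => (0, 0)
  | fuel + 1, s, e, j =>
    if left ≤ s ∧ e ≤ right then (PySem.List.pyGet? segtree j).getD (0, 0)
    else
      let mid := PySem.Int.floordiv (s + e) 2
      let child := j * 2
      let arr : List Int :=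
        (if left ≤ mid then
          let r := getF segtree left right fuel s mid child
          [r.1, r.2]
         else []) ++
        (if mid + 1 ≤ right then
          let r := getF segtree left right fuel (mid + 1) e (child + 1)
          [r.1, r.2]
         else [])
      ((PySem.List.min? arr (fun x => x)).getD 0, (PySem.List.max? arr (fun x => x)).getD 0)

def get (segtree : List (Int × Int)) (start : Int) (end_ : Int) (left : Int) (right : Int) (i : Int) : Int × Int :=
  getF segtree left right ((end_ - start).toNat + 1) start end_ i

-- ===== PORT B =====
-- The while-loop of Source B; the head of the list is the top of the stack.  The fuel is a
-- totality guard only: each iteration pops one node and the supplied fuel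
-- ((2*(end_-start)).toNat + 1) bounds the number of iterations on every input on which the
-- Python loop terminates; where it loops forever (outside Pre_) exhausted fuel stops.
def goF (segtree : List (Int × Int)) (left right : Int) : Nat → List (Int × Int × Int) → List Int → List Int
  | _, [], vals => vals
  | 0, _ :: _, vals => vals
  | fuel + 1, (s, e, j) :: rest, vals =>
    if left ≤ s ∧ e ≤ right then
      let v := (PySem.List.pyGet? segtree j).getD (0, 0)
      goF segtree left right fuel rest (vals ++ [v.1, v.2])
    else
      let mid := PySem.Int.floordiv (s + e) 2
      let child := j * 2
      let st1 := if mid + 1 ≤ right then (mid + 1, e, child + 1) :: rest else rest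
      let st2 := if left ≤ mid then (s, mid, child) :: st1 else st1
      goF segtree left right fuel st2 vals

def get_alt (segtree : List (Int × Int)) (start : Int) (end_ : Int) (left : Int) (right : Int) (i : Int) : Int × Int :=
  if left ≤ start ∧ end_ ≤ right then
    (PySem.List.pyGet? segtree i).getD (0, 0)
  else
    let vals := goF segtree left right ((2 * (end_ - start)).toNat + 1) [(start, end_, i)] []
    ((PySem.List.min? vals (fun x => x)).getD 0, (PySem.List.max? vals (fun x => x)).getD 0)

-- ===== PRECONDITION & SPEC =====
-- Pre_ excludes exactly the inputs on which Python A raises (IndexError on segtree[i],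
-- ValueError on min of an empty tuple, RecursionError on degenerate intervals) — except that the
-- recursive-branch index bound (i+1)*2^ceil(log2(end-start+1)) ≤ len covers the WHOLE subtree of i,
-- so it conservatively also excludes some returning inputs whose query visits only part of that
-- subtree, and it requires 0 ≤ i although a negative root index can occasionally return via
-- Python's wraparound; B agrees with A on all such excluded returning inputs (see cites).
def Pre_get (segtree : List (Int × Int)) (start : Int) (end_ : Int) (left : Int) (right : Int) (i : Int) : Prop :=
  if left ≤ start ∧ end_ ≤ right then
    PySem.Raise.InRange segtree.length i
  else
    start ≤ end_ ∧ left ≤ right ∧ left ≤ end_ ∧ start ≤ right ∧ 0 ≤ i ∧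
      (i + 1) * 2 ^ (Nat.clog 2 (end_ - start + 1).toNat) ≤ (segtree.length : Int)
instance (segtree : List (Int × Int)) (start : Int) (end_ : Int) (left : Int) (right : Int) (i : Int) : Decidable (Pre_get segtree start end_ left right i) := by unfold Pre_get; infer_instance

def pvWitness_get : (List (Int × Int)) × Int × Int × Int × Int × Int := ([(1, 2), (3, 4), (0, 5)], 0, 1, 0, 0, 0)

def Spec_get (segtree : List (Int × Int)) (start : Int) (end_ : Int) (left : Int) (right : Int) (i : Int) (out : Int × Int) : Prop := out = get_alt segtree start end_ left right i
instance (segtree : List (Int × Int)) (start : Int) (end_ : Int) (left : Int) (right : Int) (i : Int) (out : Int × Int) : Decidable (Spec_get segtree start end_ left right i out) := by unfold Spec_get; infer_instance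

-- ===== CLAIM (what is proved, stated in full; the proofs are below) =====
def Claim_equal_get : Prop := ∀ (segtree : List (Int × Int)) (start : Int) (end_ : Int) (left : Int) (right : Int) (i : Int), Dom_get segtree start end_ left right i → Pre_get segtree start end_ left right i → Spec_get segtree start end_ left right i (get segtree start end_ left right i)

-- ===== LEMMAS AND PROOFS =====

-- the multiset of values A's recursion / B's loop collect below node (s,e,j)
def flat (segtree : List (Int × Int)) (left right s e j : Int) : List Int :=
  if left ≤ s ∧ e ≤ right then
    [((PySem.List.pyGet? segtree j).getD (0, 0)).1, ((PySem.List.pyGet? segtree j).getD (0, 0)).2]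
  else if _h : s < e then
    (if left ≤ PySem.Int.floordiv (s + e) 2 then
      flat segtree left right s (PySem.Int.floordiv (s + e) 2) (j * 2) else []) ++
    (if PySem.Int.floordiv (s + e) 2 + 1 ≤ right then
      flat segtree left right (PySem.Int.floordiv (s + e) 2 + 1) e (j * 2 + 1) else [])
  else []
termination_by (e - s).toNat
decreasing_by
  all_goals
    have hb := PySem.Int.floordiv_two_mid_bounds (lo := s) (hi := e) (by omega)
    have hl : PySem.Int.floordiv (s + e) 2 < e :=
      (PySem.Int.floordiv_lt_iff_lt_mul (by omega)).2 (by omega)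
    omega

-- zeta-reduced one-step unfoldings of the two ports (definitional)
theorem getF_succ (segtree : List (Int × Int)) (left right : Int) (fuel : Nat) (s e j : Int) :
    getF segtree left right (fuel + 1) s e j =
      if left ≤ s ∧ e ≤ right then (PySem.List.pyGet? segtree j).getD (0, 0)
      else
        ((PySem.List.min?
            ((if left ≤ PySem.Int.floordiv (s + e) 2 then
                [(getF segtree left right fuel s (PySem.Int.floordiv (s + e) 2) (j * 2)).1,
                 (getF segtree left right fuel s (PySem.Int.floordiv (s + e) 2) (j * 2)).2] else []) ++
             (if PySem.Int.floordiv (s + e) 2 + 1 ≤ right then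
                [(getF segtree left right fuel (PySem.Int.floordiv (s + e) 2 + 1) e (j * 2 + 1)).1,
                 (getF segtree left right fuel (PySem.Int.floordiv (s + e) 2 + 1) e (j * 2 + 1)).2] else []))
            (fun x => x)).getD 0,
         (PySem.List.max?
            ((if left ≤ PySem.Int.floordiv (s + e) 2 then
                [(getF segtree left right fuel s (PySem.Int.floordiv (s + e) 2) (j * 2)).1,
                 (getF segtree left right fuel s (PySem.Int.floordiv (s + e) 2) (j * 2)).2] else []) ++
             (if PySem.Int.floordiv (s + e) 2 + 1 ≤ right then
                [(getF segtree left right fuel (PySem.Int.floordiv (s + e) 2 + 1) e (j * 2 + 1)).1,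
                 (getF segtree left right fuel (PySem.Int.floordiv (s + e) 2 + 1) e (j * 2 + 1)).2] else []))
            (fun x => x)).getD 0) := rfl

theorem goF_cons (segtree : List (Int × Int)) (left right : Int) (fuel : Nat) (s e j : Int)
    (rest : List (Int × Int × Int)) (vals : List Int) :
    goF segtree left right (fuel + 1) ((s, e, j) :: rest) vals =
      if left ≤ s ∧ e ≤ right then
        goF segtree left right fuel rest
          (vals ++ [((PySem.List.pyGet? segtree j).getD (0, 0)).1,
                    ((PySem.List.pyGet? segtree j).getD (0, 0)).2])
      else
        goF segtree left right fuel
          (if left ≤ PySem.Int.floordiv (s + e) 2 then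
            (s, PySem.Int.floordiv (s + e) 2, j * 2) ::
              (if PySem.Int.floordiv (s + e) 2 + 1 ≤ right then
                (PySem.Int.floordiv (s + e) 2 + 1, e, j * 2 + 1) :: rest else rest)
           else
            (if PySem.Int.floordiv (s + e) 2 + 1 ≤ right then
              (PySem.Int.floordiv (s + e) 2 + 1, e, j * 2 + 1) :: rest else rest)) vals := by
  conv_lhs => rw [goF]

theorem foldl_min_init (t : List Int) (x c : Int) :
    t.foldl min (min x c) = min x (t.foldl min c) := by
  induction t generalizing c with
  | nil => rfl
  | cons h tl ih => simp [List.foldl, min_assoc, ih]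

theorem foldl_max_init (t : List Int) (x c : Int) :
    t.foldl max (max x c) = max x (t.foldl max c) := by
  induction t generalizing c with
  | nil => rfl
  | cons h tl ih => simp [List.foldl, max_assoc, ih]

theorem min?_append (l1 l2 : List Int) (x y : Int)
    (h1 : PySem.List.min? l1 (fun v => v) = some x)
    (h2 : PySem.List.min? l2 (fun v => v) = some y) :
    PySem.List.min? (l1 ++ l2) (fun v => v) = some (min x y) := by
  cases l1 with
  | nil => simp [PySem.List.min?] at h1
  | cons a t1 =>
    cases l2 with
    | nil => simp [PySem.List.min?] at h2
    | cons b t2 =>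
      rw [PySem.List.min?_id_cons] at h1 h2
      have hx : t1.foldl min a = x := by injection h1
      have hy : t2.foldl min b = y := by injection h2
      have : (a :: t1 ++ b :: t2) = a :: (t1 ++ b :: t2) := rfl
      rw [this, PySem.List.min?_id_cons, List.foldl_append]
      simp only [List.foldl, hx]
      rw [foldl_min_init, hy]

theorem max?_append (l1 l2 : List Int) (x y : Int)
    (h1 : PySem.List.max? l1 (fun v => v) = some x)
    (h2 : PySem.List.max? l2 (fun v => v) = some y) :
    PySem.List.max? (l1 ++ l2) (fun v => v) = some (max x y) := by
  cases l1 with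
  | nil => simp [PySem.List.max?] at h1
  | cons a t1 =>
    cases l2 with
    | nil => simp [PySem.List.max?] at h2
    | cons b t2 =>
      rw [PySem.List.max?_id_cons] at h1 h2
      have hx : t1.foldl max a = x := by injection h1
      have hy : t2.foldl max b = y := by injection h2
      have : (a :: t1 ++ b :: t2) = a :: (t1 ++ b :: t2) := rfl
      rw [this, PySem.List.max?_id_cons, List.foldl_append]
      simp only [List.foldl, hx]
      rw [foldl_max_init, hy]

theorem exm (F : List Int) (hF : F ≠ []) :
    ∃ x y, PySem.List.min? F (fun v => v) = some x ∧ PySem.List.max? F (fun v => v) = some y := by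
  cases F with
  | nil => exact absurd rfl hF
  | cons a t => exact ⟨_, _, PySem.List.min?_id_cons a t, PySem.List.max?_id_cons a t⟩

-- a pair carrying the min and max of a nonempty list (or literally its two elements)
-- has the same min/max as the list itself
theorem pair_minmax (r : Int × Int) (F : List Int) (hne : F ≠ [])
    (h : r = ((PySem.List.min? F (fun x => x)).getD 0, (PySem.List.max? F (fun x => x)).getD 0) ∨
         F = [r.1, r.2]) :
    PySem.List.min? [r.1, r.2] (fun x => x) = PySem.List.min? F (fun x => x) ∧
    PySem.List.max? [r.1, r.2] (fun x => x) = PySem.List.max? F (fun x => x) := by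
  rcases h with h | h
  · obtain ⟨m, M, hm, hM⟩ := exm F hne
    have hmM : m ≤ M := PySem.List.min?_isMin hm M (PySem.List.max?_mem hM)
    have hr : r = (m, M) := by rw [h, hm, hM]; rfl
    subst hr
    rw [hm, hM]
    constructor
    · rw [PySem.List.min?_id_cons]
      simp [min_eq_left hmM]
    · rw [PySem.List.max?_id_cons]
      simp [max_eq_right hmM]
  · rw [h]
    exact ⟨rfl, rfl⟩

-- A node's recursion result, described through `flat` (fuel larger than the interval length
-- is enough: the interval strictly shrinks at each level)
theorem get_flat (segtree : List (Int × Int)) (left right : Int) :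
    ∀ fuel s e j, (e - s).toNat < fuel → left ≤ e → s ≤ right → s ≤ e → left ≤ right →
      flat segtree left right s e j ≠ [] ∧
      ((left ≤ s ∧ e ≤ right) →
        getF segtree left right fuel s e j = (PySem.List.pyGet? segtree j).getD (0, 0) ∧
        flat segtree left right s e j =
          [((PySem.List.pyGet? segtree j).getD (0, 0)).1, ((PySem.List.pyGet? segtree j).getD (0, 0)).2]) ∧
      (¬ (left ≤ s ∧ e ≤ right) →
        getF segtree left right fuel s e j =
          ((PySem.List.min? (flat segtree left right s e j) (fun x => x)).getD 0,
           (PySem.List.max? (flat segtree left right s e j) (fun x => x)).getD 0)) := by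
  intro fuel
  induction fuel with
  | zero => intro s e j hn; omega
  | succ fuel ih =>
  intro s e j hn hle hsr hse hlr
  by_cases hc : left ≤ s ∧ e ≤ right
  · refine ⟨?_, fun _ => ⟨?_, ?_⟩, fun hh => absurd hc hh⟩
    · rw [flat.eq_def]; simp [hc]
    · rw [getF_succ]; simp [hc]
    · rw [flat.eq_def]; simp [hc]
  · have hslt : s < e := by
      rcases eq_or_lt_of_le hse with h | h
      · exact absurd ⟨by omega, by omega⟩ hc
      · exact h
    have hb := PySem.Int.floordiv_two_mid_bounds (lo := s) (hi := e) (by omega)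
    have hml : PySem.Int.floordiv (s + e) 2 < e :=
      (PySem.Int.floordiv_lt_iff_lt_mul (by omega)).2 (by omega)
    have IHA := fun (h1 : left ≤ PySem.Int.floordiv (s + e) 2) =>
      ih s (PySem.Int.floordiv (s + e) 2) (j * 2) (by omega) h1 hsr hb.1 hlr
    have IHB := fun (h2 : PySem.Int.floordiv (s + e) 2 + 1 ≤ right) =>
      ih (PySem.Int.floordiv (s + e) 2 + 1) e (j * 2 + 1) (by omega) hle h2 (by omega) hlr
    have childA : ∀ h1 : left ≤ PySem.Int.floordiv (s + e) 2,
        PySem.List.min? [(getF segtree left right fuel s (PySem.Int.floordiv (s + e) 2) (j * 2)).1,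
                         (getF segtree left right fuel s (PySem.Int.floordiv (s + e) 2) (j * 2)).2] (fun x => x) =
          PySem.List.min? (flat segtree left right s (PySem.Int.floordiv (s + e) 2) (j * 2)) (fun x => x) ∧
        PySem.List.max? [(getF segtree left right fuel s (PySem.Int.floordiv (s + e) 2) (j * 2)).1,
                         (getF segtree left right fuel s (PySem.Int.floordiv (s + e) 2) (j * 2)).2] (fun x => x) =
          PySem.List.max? (flat segtree left right s (PySem.Int.floordiv (s + e) 2) (j * 2)) (fun x => x) := by
      intro h1
      obtain ⟨hne, hcov, hunc⟩ := IHA h1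
      by_cases hcc : left ≤ s ∧ PySem.Int.floordiv (s + e) 2 ≤ right
      · obtain ⟨hg, hf⟩ := hcov hcc
        exact pair_minmax _ _ hne (Or.inr (by rw [hg, hf]))
      · exact pair_minmax _ _ hne (Or.inl (hunc hcc))
    have childB : ∀ h2 : PySem.Int.floordiv (s + e) 2 + 1 ≤ right,
        PySem.List.min? [(getF segtree left right fuel (PySem.Int.floordiv (s + e) 2 + 1) e (j * 2 + 1)).1,
                         (getF segtree left right fuel (PySem.Int.floordiv (s + e) 2 + 1) e (j * 2 + 1)).2] (fun x => x) =
          PySem.List.min? (flat segtree left right (PySem.Int.floordiv (s + e) 2 + 1) e (j * 2 + 1)) (fun x => x) ∧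
        PySem.List.max? [(getF segtree left right fuel (PySem.Int.floordiv (s + e) 2 + 1) e (j * 2 + 1)).1,
                         (getF segtree left right fuel (PySem.Int.floordiv (s + e) 2 + 1) e (j * 2 + 1)).2] (fun x => x) =
          PySem.List.max? (flat segtree left right (PySem.Int.floordiv (s + e) 2 + 1) e (j * 2 + 1)) (fun x => x) := by
      intro h2
      obtain ⟨hne, hcov, hunc⟩ := IHB h2
      by_cases hcc : left ≤ PySem.Int.floordiv (s + e) 2 + 1 ∧ e ≤ right
      · obtain ⟨hg, hf⟩ := hcov hcc
        exact pair_minmax _ _ hne (Or.inr (by rw [hg, hf]))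
      · exact pair_minmax _ _ hne (Or.inl (hunc hcc))
    refine ⟨?_, fun hh => absurd hh hc, fun _ => ?_⟩
    · rw [flat.eq_def, if_neg hc, dif_pos hslt]
      intro hemp
      rcases (show left ≤ PySem.Int.floordiv (s + e) 2 ∨ PySem.Int.floordiv (s + e) 2 + 1 ≤ right by omega) with h1 | h2
      · rw [if_pos h1] at hemp
        exact (IHA h1).1 (List.append_eq_nil_iff.mp hemp).1
      · rw [if_pos h2] at hemp
        exact (IHB h2).1 (List.append_eq_nil_iff.mp hemp).2
    · rw [getF_succ, if_neg hc]
      conv_rhs => rw [flat.eq_def]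
      rw [if_neg hc, dif_pos hslt]
      by_cases h1 : left ≤ PySem.Int.floordiv (s + e) 2 <;>
        by_cases h2 : PySem.Int.floordiv (s + e) 2 + 1 ≤ right
      · obtain ⟨xa, ya, hxa, hya⟩ := exm _ (IHA h1).1
        obtain ⟨xb, yb, hxb, hyb⟩ := exm _ (IHB h2).1
        have hLa := (childA h1).1.trans hxa
        have hLb := (childB h2).1.trans hxb
        have hMa := (childA h1).2.trans hya
        have hMb := (childB h2).2.trans hyb
        rw [if_pos h1, if_pos h2, if_pos h1, if_pos h2,
            min?_append _ _ _ _ hLa hLb, max?_append _ _ _ _ hMa hMb,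
            min?_append _ _ _ _ hxa hxb, max?_append _ _ _ _ hya hyb]
      · rw [if_pos h1, if_neg h2, if_pos h1, if_neg h2, List.append_nil, List.append_nil,
            (childA h1).1, (childA h1).2]
      · rw [if_neg h1, if_pos h2, if_neg h1, if_pos h2, List.nil_append, List.nil_append,
            (childB h2).1, (childB h2).2]
      · omega

-- B's loop, described through `flat`: under the node invariant, fuel at least the
-- weighted stack size bounds the number of iterations
theorem go_flat (segtree : List (Int × Int)) (left right : Int) (hlr : left ≤ right) :
    ∀ fuel stack vals,
      (stack.map (fun t : Int × Int × Int => (2 * (t.2.1 - t.1)).toNat + 1)).sum ≤ fuel →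
      (∀ t ∈ stack, left ≤ t.2.1 ∧ t.1 ≤ right ∧ t.1 ≤ t.2.1) →
      goF segtree left right fuel stack vals =
        vals ++ (stack.map (fun t : Int × Int × Int => flat segtree left right t.1 t.2.1 t.2.2)).flatten := by
  intro fuel
  induction fuel with
  | zero =>
    intro stack vals hn _
    cases stack with
    | nil => simp [goF]
    | cons t rest => simp only [List.map_cons, List.sum_cons] at hn; omega
  | succ fuel ih =>
  intro stack vals hn hinv
  cases stack with
  | nil => simp [goF]
  | cons t rest =>
  obtain ⟨⟨s, e, j⟩, rfl⟩ : ∃ u : Int × Int × Int, u = t := ⟨t, rfl⟩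
  simp only [List.map_cons, List.sum_cons] at hn
  have hinvh := hinv (s, e, j) (List.mem_cons_self)
  have hinvr : ∀ u ∈ rest, left ≤ u.2.1 ∧ u.1 ≤ right ∧ u.1 ≤ u.2.1 :=
    fun u hu => hinv u (List.mem_cons_of_mem _ hu)
  obtain ⟨hle, hsr, hse⟩ : left ≤ e ∧ s ≤ right ∧ s ≤ e := hinvh
  rw [goF_cons]
  by_cases hc : left ≤ s ∧ e ≤ right
  · rw [if_pos hc, ih rest _ (by omega) hinvr, List.map_cons, List.flatten_cons]
    conv_rhs => rw [flat.eq_def]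
    rw [if_pos hc]
    simp
  · have hslt : s < e := by
      rcases eq_or_lt_of_le hse with h | h
      · exact absurd ⟨by omega, by omega⟩ hc
      · exact h
    have hb := PySem.Int.floordiv_two_mid_bounds (lo := s) (hi := e) (by omega)
    have hml : PySem.Int.floordiv (s + e) 2 < e :=
      (PySem.Int.floordiv_lt_iff_lt_mul (by omega)).2 (by omega)
    have hfd : PySem.Int.floordiv (s + e) 2 = (s + e) / 2 :=
      PySem.Int.floordiv_eq_ediv_of_pos (by omega)
    rw [if_neg hc]
    conv_rhs => rw [List.map_cons, List.flatten_cons, flat.eq_def]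
    rw [if_neg hc, dif_pos hslt]
    by_cases h1 : left ≤ PySem.Int.floordiv (s + e) 2 <;>
      by_cases h2 : PySem.Int.floordiv (s + e) 2 + 1 ≤ right
    · rw [if_pos h1, if_pos h2, if_pos h1, if_pos h2,
          ih _ _ (by simp at hn ⊢; omega)
            (by
              intro u hu
              rcases List.mem_cons.mp hu with rfl | hu
              · exact ⟨h1, hsr, hb.1⟩
              rcases List.mem_cons.mp hu with rfl | hu
              · exact ⟨hle, h2, show PySem.Int.floordiv (s + e) 2 + 1 ≤ e by omega⟩
              · exact hinvr u hu),
          List.map_cons, List.map_cons, List.flatten_cons, List.flatten_cons]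
      simp [List.append_assoc]
    · rw [if_pos h1, if_neg h2, if_pos h1, if_neg h2,
          ih _ _ (by simp at hn ⊢; omega)
            (by
              intro u hu
              rcases List.mem_cons.mp hu with rfl | hu
              · exact ⟨h1, hsr, hb.1⟩
              · exact hinvr u hu),
          List.map_cons, List.flatten_cons]
      simp
    · rw [if_neg h1, if_pos h2, if_neg h1, if_pos h2,
          ih _ _ (by simp at hn ⊢; omega)
            (by
              intro u hu
              rcases List.mem_cons.mp hu with rfl | hu
              · exact ⟨hle, h2, show PySem.Int.floordiv (s + e) 2 + 1 ≤ e by omega⟩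
              · exact hinvr u hu),
          List.map_cons, List.flatten_cons]
      simp
    · omega

-- ===== VERDICT (by name: the statement is the Claim_ definition above) =====
theorem get_spec : Claim_equal_get := by
  intro segtree start end_ left right i _hd hpre
  unfold Spec_get get_alt _root_.get
  by_cases hc : left ≤ start ∧ end_ ≤ right
  · rw [getF_succ]; simp [hc]
  · unfold Pre_get at hpre
    rw [if_neg hc] at hpre
    obtain ⟨hse, hlr, hle, hsr, _, _⟩ := hpre
    have h := get_flat segtree left right ((end_ - start).toNat + 1) start end_ i
      (by omega) hle hsr hse hlr
    have hB : goF segtree left right ((2 * (end_ - start)).toNat + 1) [(start, end_, i)] [] =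
        flat segtree left right start end_ i := by
      rw [go_flat segtree left right hlr _ [(start, end_, i)] []
        (by simp only [List.map_cons, List.map_nil, List.sum_cons, List.sum_nil]; omega)
        (by intro u hu; rcases List.mem_cons.mp hu with rfl | hu
            · exact ⟨hle, hsr, hse⟩
            · simp at hu)]
      simp
    rw [if_neg hc]
    simp only [hB]
    exact (h.2.2 hc) ▸ rfl
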